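-- pv_equiv track=rewrite | github.com/NaNameUz3r/Survivor_-_28_tasks- | task_13/ufo.py | UFO
-- ===== SOURCE A (Python) =====
-- def UFO(N, data, octal):
--
--     converted = []
--
--     if octal:
--         for i in range(N):
--             result = 0
--             power = len(str(data[i])) - 1
--             for j in str(data[i]):
--                 tmp = int(j) * (8 ** power)
--                 result += tmp
--                 power -= 1
--             converted.append(result)
--     else:
--         for i in range(N):
--             result = 0
--             power = len(str(data[i])) - 1
--             for j in str(data[i]):
--                 tmp = int(j) * (16 ** power)
--                 result += tmp
--                 power -= 1
--             converted.append(result)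
--
--     return converted
-- ===== SOURCE B (Python) =====
-- def UFO(N, data, octal):
--     base = 8 if octal else 16
--     converted = []
--     for i in range(N):
--         result = 0
--         for ch in str(data[i]):
--             result = result * base + int(ch)
--         converted.append(result)
--     return converted
-- ===== Notes on version B (the rewrite author's own statement) =====
-- stated objective: simpler
-- what changed: Collapses A's two duplicated octal/hex branches into one loop with base = 8 or 16, and replaces the descending-power accumulator (len(str)-1 exponent, per-digit 8**power / 16**power) with a left-to-right Horner fold result = result*base + int(ch).
import Mathlib
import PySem

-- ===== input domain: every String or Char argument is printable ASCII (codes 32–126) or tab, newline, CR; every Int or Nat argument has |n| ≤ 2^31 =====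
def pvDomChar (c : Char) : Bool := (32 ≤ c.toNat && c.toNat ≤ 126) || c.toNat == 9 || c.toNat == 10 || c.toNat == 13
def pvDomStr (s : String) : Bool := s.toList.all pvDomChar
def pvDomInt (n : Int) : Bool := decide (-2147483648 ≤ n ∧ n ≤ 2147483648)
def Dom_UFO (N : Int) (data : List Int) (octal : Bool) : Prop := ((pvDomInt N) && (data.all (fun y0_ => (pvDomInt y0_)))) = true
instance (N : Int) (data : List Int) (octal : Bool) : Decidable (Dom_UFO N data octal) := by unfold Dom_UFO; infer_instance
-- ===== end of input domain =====

-- B collapses A's two duplicated octal/hex branches into one loop with base = 8/16 and uses a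
-- left-to-right Horner fold (result = result*base + int(ch)) instead of descending powers (simpler).


-- ===== PORT A =====
-- int(j) for the single character j of str(data[i]); exact on '0'..'9', which str of a
-- nonnegative int (guaranteed by Pre_UFO) always produces.
def pyDigit (c : Char) : Int := (c.toNat : Int) - 48

-- ports of A's two identical inner loops: result = 0; power = len(str)-1;
-- for j in str: result += int(j) * (base ** power); power -= 1.
-- power stays ≥ 0 while used (str(n) is never empty), so 'base ^ power.toNat' is exact.
def UFO (N : Int) (data : List Int) (octal : Bool) : List Int :=
  if octal then
    (PySem.List.pyRange 0 N 1).foldl (fun converted i =>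
      let s := PySem.Int.toChars (PySem.List.pyGetD data i 0)  -- data[i]: in range under Pre_UFO
      converted ++ [(s.foldl
          (fun rp j => (rp.1 + pyDigit j * (8 : Int) ^ rp.2.toNat, rp.2 - 1))
          ((0 : Int), (s.length : Int) - 1)).1]) []
  else
    (PySem.List.pyRange 0 N 1).foldl (fun converted i =>
      let s := PySem.Int.toChars (PySem.List.pyGetD data i 0)
      converted ++ [(s.foldl
          (fun rp j => (rp.1 + pyDigit j * (16 : Int) ^ rp.2.toNat, rp.2 - 1))
          ((0 : Int), (s.length : Int) - 1)).1]) []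

-- ===== PORT B =====
def UFO_alt (N : Int) (data : List Int) (octal : Bool) : List Int :=
  let base : Int := if octal then 8 else 16
  (PySem.List.pyRange 0 N 1).foldl (fun converted i =>
    converted ++ [(PySem.Int.toChars (PySem.List.pyGetD data i 0)).foldl
        (fun result ch => result * base + pyDigit ch) 0]) []

-- ===== PRECONDITION & SPEC =====
-- Pre_UFO: exactly where Python A returns normally — each data[i] for i < N must exist
-- (else IndexError) and be nonnegative (str(negative) starts with '-' and int('-…digit-by-digit')
-- raises ValueError).
def Pre_UFO (N : Int) (data : List Int) (octal : Bool) : Prop :=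
  N ≤ (data.length : Int) ∧ ∀ x ∈ data.take N.toNat, 0 ≤ x
instance (N : Int) (data : List Int) (octal : Bool) : Decidable (Pre_UFO N data octal) := by unfold Pre_UFO; infer_instance
def pvWitness_UFO : Int × List Int × Bool := (3, [17, 0, 255], true)

def Spec_UFO (N : Int) (data : List Int) (octal : Bool) (out : List Int) : Prop := out = UFO_alt N data octal
instance (N : Int) (data : List Int) (octal : Bool) (out : List Int) : Decidable (Spec_UFO N data octal out) := by unfold Spec_UFO; infer_instance

-- ===== CLAIM (what is proved, stated in full; the proofs are below) =====
def Claim_equal_UFO : Prop := ∀ (N : Int) (data : List Int) (octal : Bool), Dom_UFO N data octal → Pre_UFO N data octal → Spec_UFO N data octal (UFO N data octal)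

-- ===== LEMMAS AND PROOFS =====

-- Horner fold from accumulator a = a * base^len + Horner fold from 0.
theorem horner_acc (base : Int) (cs : List Char) :
    ∀ a : Int, cs.foldl (fun r c => r * base + pyDigit c) a
      = a * base ^ cs.length + cs.foldl (fun r c => r * base + pyDigit c) 0 := by
  induction cs with
  | nil => intro a; simp
  | cons c cs ih =>
    intro a
    simp only [List.foldl_cons, List.length_cons]
    rw [ih (a * base + pyDigit c), ih (0 * base + pyDigit c)]
    ring

-- A's descending-power accumulator starting at (r, len-1) equals r + the Horner value.
theorem desc_eq_horner (base : Int) (cs : List Char) :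
    ∀ r : Int,
      (cs.foldl (fun rp j => (rp.1 + pyDigit j * base ^ rp.2.toNat, rp.2 - 1))
        (r, (cs.length : Int) - 1)).1
      = r + cs.foldl (fun res c => res * base + pyDigit c) 0 := by
  induction cs with
  | nil => intro r; simp
  | cons c cs ih =>
    intro r
    simp only [List.foldl_cons, List.length_cons]
    have h1 : ((cs.length : Int) + 1 - 1).toNat = cs.length := by omega
    have h2 : (cs.length : Int) + 1 - 1 - 1 = (cs.length : Int) - 1 := by omega
    push_cast
    rw [h1, h2, ih (r + pyDigit c * base ^ cs.length),
        horner_acc base cs (0 * base + pyDigit c)]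
    ring

-- ===== VERDICT (by name: the statement is the Claim_ definition above) =====
theorem UFO_spec : Claim_equal_UFO := by
  intro N data octal _ _
  unfold Spec_UFO UFO UFO_alt
  cases octal <;>
    simp only [if_true, if_false, Bool.false_eq_true, PySem.List.foldl_append_singleton_eq_map,
      List.nil_append] <;>
    exact List.map_congr_left (fun i _ => by
      rw [desc_eq_horner]; simp)
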